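-- pv_equiv track=rewrite | github.com/nizpott/nizpott.github.io | tp2.py | mirror
-- ===== SOURCE A (Python) =====
-- def mirror(body,horizontal,vertical):
--     """
--     Mirror the image in horizontal and vertical form
--     Params:
--         body (list) List of lists, than represent the body.
--         horizontal (int) Times to mirror in horizontal
--         vertical (int) Times to mirror in vertical
--     """
--     for i in range(1,horizontal): # Times to mirror in horizontal
--         mirrors = []
--         for y in body: # Reed every "line" to be reversed
--             aux = y[::-1] # as reverse()
--             mirrors.append(aux)
--         for e,m in enumerate(mirrors):
--             body[e].extend(mirrors[e]) # Merge both lists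
--     mirrors = []
--     for i in range(1,vertical): # Times to mirror in vertical
--         aux = body[::-1] # as reverse()
--         mirrors.extend(aux)
--     body.extend(mirrors) # Merge both lists
--     return body
-- ===== SOURCE B (Python) =====
-- def mirror(body, horizontal, vertical):
--     # Closed-form mirroring: a mirrored row is a palindrome, so each horizontal
--     # pass after the first just doubles it -> (row + row[::-1]) * 2**(horizontal-2).
--     if horizontal >= 2:
--         factor = 2 ** (horizontal - 2)
--         for row in body:
--             row[:] = (row + row[::-1]) * factor
--     if vertical >= 2:
--         body.extend(body[::-1] * (vertical - 1))
--     return body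
-- ===== Notes on version B (the rewrite author's own statement) =====
-- stated objective: simpler
-- what changed: Replaces A's per-pass horizontal loop (reverse every row and extend it, horizontal-1 times) by the closed form row := (row + row[::-1]) * 2**(horizontal-2) (a mirrored row is a palindrome, so every pass after the first just doubles it), and builds the vertical part directly as body[::-1] * (vertical - 1); note both A and B mutate body (and its rows) in place, the claim is about the return value.
import Mathlib
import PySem

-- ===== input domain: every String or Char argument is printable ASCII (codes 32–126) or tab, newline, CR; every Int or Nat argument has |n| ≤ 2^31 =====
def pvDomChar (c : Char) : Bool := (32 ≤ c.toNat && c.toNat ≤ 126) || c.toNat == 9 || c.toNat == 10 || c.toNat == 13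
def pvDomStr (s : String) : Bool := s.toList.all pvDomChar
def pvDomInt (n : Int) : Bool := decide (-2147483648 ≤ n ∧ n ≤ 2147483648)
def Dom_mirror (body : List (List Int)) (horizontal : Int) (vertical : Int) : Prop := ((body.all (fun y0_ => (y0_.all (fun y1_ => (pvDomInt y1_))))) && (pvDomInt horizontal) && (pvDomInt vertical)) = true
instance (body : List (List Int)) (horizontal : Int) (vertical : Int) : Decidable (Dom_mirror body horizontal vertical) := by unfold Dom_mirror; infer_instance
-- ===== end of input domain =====

-- B replaces A's repeated mirror-and-extend passes by the closed form
-- (row + row[::-1]) * 2^(horizontal-2) per row and body[::-1] * (vertical-1);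
-- both Pythons mutate body in place, the equivalence proved is about the return value.

-- ===== PORT A =====
-- y[::-1] and body[::-1] are List.reverse (PySem.List.slice?_none_none_neg_one).
-- one iteration of A's horizontal loop: mirrors = [y[::-1] for y in b]; body[e].extend(mirrors[e])
def mirrorStepA (b : List (List Int)) : List (List Int) :=
  let mirrors := b.foldl (fun acc y => acc ++ [y.reverse]) ([] : List (List Int))
  (PySem.List.enumerate mirrors).foldl
    (fun bb em => bb.set em.1.toNat (bb.getD em.1.toNat [] ++ em.2)) b
-- the body after "for i in range(1, horizontal): ..."
def mirrorBody1 (body : List (List Int)) (horizontal : Int) : List (List Int) :=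
  (PySem.List.pyRange 1 horizontal 1).foldl (fun b _ => mirrorStepA b) body
def mirror (body : List (List Int)) (horizontal : Int) (vertical : Int) : List (List Int) :=
  -- mirrors = []; for i in range(1, vertical): mirrors.extend(body[::-1]); body.extend(mirrors)
  mirrorBody1 body horizontal ++
    (PySem.List.pyRange 1 vertical 1).foldl
      (fun acc _ => acc ++ (mirrorBody1 body horizontal).reverse) ([] : List (List Int))

-- ===== PORT B =====
-- list * n is (List.replicate n list).flatten (n ≥ 0 in both guarded branches).
-- rows after the closed-form horizontal step: row[:] = (row + row[::-1]) * 2**(horizontal-2)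
def mirrorAltBody1 (body : List (List Int)) (horizontal : Int) : List (List Int) :=
  if 2 ≤ horizontal then
    body.map (fun row => (List.replicate (2 ^ (horizontal - 2).toNat) (row ++ row.reverse)).flatten)
  else body
def mirror_alt (body : List (List Int)) (horizontal : Int) (vertical : Int) : List (List Int) :=
  if 2 ≤ vertical then
    mirrorAltBody1 body horizontal ++
      (List.replicate (vertical - 1).toNat (mirrorAltBody1 body horizontal).reverse).flatten
  else mirrorAltBody1 body horizontal

-- ===== PRECONDITION & SPEC =====
def Spec_mirror (body : List (List Int)) (horizontal : Int) (vertical : Int) (out : List (List Int)) : Prop := out = mirror_alt body horizontal vertical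
instance (body : List (List Int)) (horizontal : Int) (vertical : Int) (out : List (List Int)) : Decidable (Spec_mirror body horizontal vertical out) := by unfold Spec_mirror; infer_instance

-- ===== CLAIM (what is proved, stated in full; the proofs are below) =====
def Claim_equal_mirror : Prop := ∀ (body : List (List Int)) (horizontal : Int) (vertical : Int), Dom_mirror body horizontal vertical → Spec_mirror body horizontal vertical (mirror body horizontal vertical)

-- ===== LEMMAS AND PROOFS =====

-- a foldl that ignores the elements is function iteration
theorem foldl_ignore {α β : Type} (g : α → α) (l : List β) (init : α) :
    l.foldl (fun x _ => g x) init = g^[l.length] init := by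
  induction l generalizing init with
  | nil => rfl
  | cons x xs ih => simp [List.foldl_cons, ih, Function.iterate_succ_apply]

-- appending a constant list each iteration is flatten of replicate
theorem foldl_append_const {α β : Type} (c : List α) (l : List β) (init : List α) :
    l.foldl (fun acc _ => acc ++ c) init = init ++ (List.replicate l.length c).flatten := by
  induction l generalizing init with
  | nil => simp
  | cons x xs ih => simp [List.foldl_cons, ih, List.replicate_succ]

-- the enumerate/set/getD fold of A's inner horizontal pass is pointwise append
theorem enum_set_fold (pre b ms : List (List Int)) (h : ms.length = b.length) :
    (PySem.List.enumerate ms (pre.length : Int)).foldl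
      (fun bb em => bb.set em.1.toNat (bb.getD em.1.toNat [] ++ em.2)) (pre ++ b)
      = pre ++ List.zipWith (· ++ ·) b ms := by
  induction ms generalizing pre b with
  | nil => cases b <;> simp_all
  | cons m ms ih =>
    cases b with
    | nil => simp at h
    | cons b0 b' =>
      rw [PySem.List.enumerate_cons, List.foldl_cons]
      have hget : (pre ++ b0 :: b').getD ((pre.length : Int)).toNat [] = b0 := by
        simp [List.getD]
      have hset : (pre ++ b0 :: b').set ((pre.length : Int)).toNat (b0 ++ m)
          = (pre ++ [b0 ++ m]) ++ b' := by
        rw [Int.toNat_natCast, List.set_append_right _ _ (Nat.le_refl _)]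
        simp
      rw [hget, hset]
      have hlen : ((pre.length : Int) + 1) = (((pre ++ [b0 ++ m]).length : Nat) : Int) := by
        simp
      rw [hlen, ih (pre ++ [b0 ++ m]) b' (by simpa using h)]
      simp

-- hence one horizontal pass maps every row to row ++ row.reverse
theorem stepA_eq_map (b : List (List Int)) :
    mirrorStepA b = b.map (fun y => y ++ y.reverse) := by
  unfold mirrorStepA
  rw [PySem.List.foldl_append_singleton_eq_map]
  have := enum_set_fold [] b (b.map List.reverse) (by simp)
  simpa [List.zipWith_map_right] using this

-- a doubled row is a palindrome, and so is any number of copies of it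
theorem rep_palindrome (r : List Int) (m : Nat) :
    ((List.replicate m (r ++ r.reverse)).flatten).reverse
      = (List.replicate m (r ++ r.reverse)).flatten := by
  induction m with
  | zero => simp
  | succ k ih =>
    have h1 : (List.replicate (k+1) (r ++ r.reverse)).flatten
        = (List.replicate k (r ++ r.reverse)).flatten ++ (r ++ r.reverse) := by
      rw [List.replicate_succ']; simp
    rw [h1, List.reverse_append, ih]
    simp only [List.reverse_append, List.reverse_reverse]
    rw [← List.flatten_cons, ← List.replicate_succ, h1]

-- iterating the row map n ≥ 1 times gives 2^(n-1) copies of row ++ row.reverse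
theorem row_iterate (n : Nat) (hn : 1 ≤ n) (r : List Int) :
    (fun y : List Int => y ++ y.reverse)^[n] r
      = (List.replicate (2 ^ (n - 1)) (r ++ r.reverse)).flatten := by
  induction n with
  | zero => omega
  | succ k ih =>
    rcases Nat.eq_or_lt_of_le hn with h1 | h1
    · simp [← h1]
    · have hk : 1 ≤ k := by omega
      rw [Function.iterate_succ_apply', ih hk, rep_palindrome]
      have : 2 ^ (k + 1 - 1) = 2 ^ (k - 1) + 2 ^ (k - 1) := by
        rw [show k + 1 - 1 = (k - 1) + 1 by omega, pow_succ]
        ring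
      rw [this, List.replicate_add, List.flatten_append]

-- iterating map is mapping the iterate
theorem map_iterate {α : Type} (f : α → α) (n : Nat) (l : List α) :
    (List.map f)^[n] l = l.map f^[n] := by
  induction n generalizing l with
  | zero => simp
  | succ k ih => rw [Function.iterate_succ_apply, ih, List.map_map]; rfl

-- the two horizontal phases agree
theorem body1_eq (body : List (List Int)) (horizontal : Int) :
    mirrorBody1 body horizontal = mirrorAltBody1 body horizontal := by
  unfold mirrorBody1 mirrorAltBody1
  rw [show (fun (b : List (List Int)) (_ : Int) => mirrorStepA b)
        = (fun (b : List (List Int)) (_ : Int) => b.map (fun y => y ++ y.reverse))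
      from funext fun b => funext fun _ => stepA_eq_map b]
  rw [foldl_ignore, PySem.List.length_pyRange_one, map_iterate]
  by_cases h2 : 2 ≤ horizontal
  · rw [if_pos h2]
    apply List.map_congr_left
    intro r _
    rw [row_iterate _ (by omega),
        show (horizontal - 1).toNat - 1 = (horizontal - 2).toNat from by omega]
  · rw [if_neg h2]
    have : (horizontal - 1).toNat = 0 := by omega
    simp [this]

-- ===== VERDICT (by name: the statement is the Claim_ definition above) =====
theorem mirror_spec : Claim_equal_mirror := by
  intro body horizontal vertical _
  unfold Spec_mirror mirror mirror_alt
  rw [body1_eq, foldl_append_const, PySem.List.length_pyRange_one]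
  by_cases hv : 2 ≤ vertical
  · simp [hv]
  · have : (vertical - 1).toNat = 0 := by omega
    simp [hv, this]
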